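-- pv_equiv track=rewrite | github.com/SantiagoRR2004/AdaByron | 753.py | can_partition_TLE
-- ===== SOURCE A (Python) =====
-- def can_partition_TLE(nums):
--
--     # No consideramos el caso en que la suma de los elementos es impar
--     # porque el enunciado dice que siempre será par
--
--     target = sum(nums) // 2
--     n = len(nums)
--
--     # Crear un conjunto para almacenar las sumas alcanzables
--     achievable_sums = {0}
--
--     for num in nums:
--         new_sums = set()
--         for s in achievable_sums:
--             if s + num == target:
--                 return True
--             new_sums.add(s + num)
--         achievable_sums.update(new_sums)
--
--     return target in achievable_sums
-- ===== SOURCE B (Python) =====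
-- def subset_sums(part):
--     # All subset sums of part, by divide and conquer: split in half, combine pairwise.
--     if len(part) <= 1:
--         return {0, part[0]} if part else {0}
--     mid = len(part) // 2
--     return {x + y for x in subset_sums(part[:mid]) for y in subset_sums(part[mid:])}
--
--
-- def can_partition_TLE(nums):
--     # Meet in the middle: target is a subset sum iff it splits as x (from the left
--     # half's sums) plus a complement found in the right half's sums.
--     target = sum(nums) // 2
--     mid = len(nums) // 2
--     right = subset_sums(nums[mid:])
--     return any(target - x in right for x in subset_sums(nums[:mid]))
-- ===== Notes on version B (the rewrite author's own statement) =====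
-- stated objective: alternative
-- what changed: Replaces A's left-to-right expansion of one growing reachable-sums set (inner scan and early return per element) by meet-in-the-middle: each half's subset sums are built by divide-and-conquer pairwise combination and the target is found as a left-half sum plus a complement looked up in the right-half set; the two strategies trade which inputs cost more set work, and no speed claim is made.
import Mathlib
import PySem

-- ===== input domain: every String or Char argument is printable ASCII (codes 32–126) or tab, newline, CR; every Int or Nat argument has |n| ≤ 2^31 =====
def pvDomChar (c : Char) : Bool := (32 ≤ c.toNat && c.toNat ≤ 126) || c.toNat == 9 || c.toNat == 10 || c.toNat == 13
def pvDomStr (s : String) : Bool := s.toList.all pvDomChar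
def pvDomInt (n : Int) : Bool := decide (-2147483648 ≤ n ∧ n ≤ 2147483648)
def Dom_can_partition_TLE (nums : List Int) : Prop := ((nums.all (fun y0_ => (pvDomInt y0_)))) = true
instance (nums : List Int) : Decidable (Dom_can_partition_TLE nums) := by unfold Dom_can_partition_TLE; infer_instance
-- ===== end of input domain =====

-- B replaces A's left-to-right expansion of one growing reachable-sums set by
-- meet-in-the-middle: each half's subset sums are built by divide-and-conquer
-- pairwise combination and the target is found as a left-half sum plus a
-- complement looked up in the right-half set (an alternative algorithm; no
-- speed claim is made).

-- ===== PORT A =====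
-- inner loop: 'for s in achievable_sums: if s + num == target: return True; new_sums.add(s + num)'
-- (none = the early 'return True' fired; some = the built new_sums)
def pvInnerA (tgt num : Int) : List Int → PySem.Set Int → Option (PySem.Set Int)
  | [], newSums => some newSums
  | s :: rest, newSums =>
      if s + num = tgt then none
      else pvInnerA tgt num rest (PySem.Set.add newSums (s + num))

-- outer loop: 'for num in nums: …' carrying achievable_sums; at the end 'return target in achievable_sums'
def pvLoopA (tgt : Int) : List Int → PySem.Set Int → Bool
  | [], ach => PySem.Set.contains ach tgt
  | num :: rest, ach =>
      match pvInnerA tgt num ach PySem.Set.empty with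
      | none => true
      | some newSums => pvLoopA tgt rest (PySem.Set.update ach newSums)

def can_partition_TLE (nums : List Int) : Bool :=
  let tgt := PySem.Int.floordiv nums.sum 2
  -- 'n = len(nums)' in the source is unused
  pvLoopA tgt nums (PySem.Set.add PySem.Set.empty 0)

-- ===== PORT B =====
-- 'subset_sums(part)': divide and conquer; the set comprehension is ofList of the pairwise sums
def pvSums (part : List Int) : PySem.Set Int :=
  if _h : part.length ≤ 1 then
    match part with
    | [] => PySem.Set.ofList [0]
    | x :: _ => PySem.Set.ofList [0, x]
  else
    let mid := part.length / 2
    PySem.Set.ofList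
      ((pvSums (part.take mid)).flatMap fun x => (pvSums (part.drop mid)).map fun y => x + y)
termination_by part.length
decreasing_by
  all_goals simp only [List.length_take, List.length_drop]; omega

-- 'return any(target - x in right for x in subset_sums(nums[:mid]))'
def can_partition_TLE_alt (nums : List Int) : Bool :=
  let tgt := PySem.Int.floordiv nums.sum 2
  let mid := nums.length / 2
  let right := pvSums (nums.drop mid)
  (pvSums (nums.take mid)).any fun x => PySem.Set.contains right (tgt - x)

-- ===== PRECONDITION & SPEC =====
def Spec_can_partition_TLE (nums : List Int) (out : Bool) : Prop := out = can_partition_TLE_alt nums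
instance (nums : List Int) (out : Bool) : Decidable (Spec_can_partition_TLE nums out) := by unfold Spec_can_partition_TLE; infer_instance

-- ===== CLAIM (what is proved, stated in full; the proofs are below) =====
def Claim_equal_can_partition_TLE : Prop := ∀ (nums : List Int), Dom_can_partition_TLE nums → Spec_can_partition_TLE nums (can_partition_TLE nums)

-- ===== LEMMAS AND PROOFS =====

-- reference model: all subset sums of a list (with multiplicity; only membership is used)
def pvSS : List Int → List Int
  | [] => [0]
  | x :: l => pvSS l ++ (pvSS l).map (fun s => s + x)

lemma pvSS_zero_mem (l : List Int) : (0 : Int) ∈ pvSS l := by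
  induction l with
  | nil => simp [pvSS]
  | cons x l ih => simp [pvSS]; exact Or.inl ih

-- ---- A-side: the loop returns true iff some base element plus a subset sum of the rest hits tgt ----

lemma pvInnerA_none_iff (tgt num : Int) (l : List Int) (acc : PySem.Set Int) :
    pvInnerA tgt num l acc = none ↔ ∃ s ∈ l, s + num = tgt := by
  induction l generalizing acc with
  | nil => simp [pvInnerA]
  | cons s l ih =>
    by_cases h : s + num = tgt
    · simp [pvInnerA, h]
    · simp [pvInnerA, h, ih]

lemma pvInnerA_some_mem (tgt num : Int) (l : List Int) (acc out : PySem.Set Int)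
    (h : pvInnerA tgt num l acc = some out) (y : Int) :
    y ∈ out ↔ y ∈ acc ∨ ∃ s ∈ l, y = s + num := by
  induction l generalizing acc with
  | nil =>
    simp [pvInnerA] at h
    simp [← h]
  | cons s l ih =>
    by_cases hs : s + num = tgt
    · simp [pvInnerA, hs] at h
    · simp only [pvInnerA, if_neg hs] at h
      rw [ih _ h]
      simp only [PySem.Set.mem_add, List.mem_cons]
      constructor
      · rintro ((hy | rfl) | ⟨t, ht, rfl⟩)
        · exact Or.inl hy
        · exact Or.inr ⟨s, Or.inl rfl, rfl⟩
        · exact Or.inr ⟨t, Or.inr ht, rfl⟩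
      · rintro (hy | ⟨t, (rfl | ht), rfl⟩)
        · exact Or.inl (Or.inl hy)
        · exact Or.inl (Or.inr rfl)
        · exact Or.inr ⟨t, ht, rfl⟩

lemma pvLoopA_iff (tgt : Int) (rest : List Int) (ach : PySem.Set Int) :
    pvLoopA tgt rest ach = true ↔ ∃ b ∈ ach, ∃ s ∈ pvSS rest, b + s = tgt := by
  induction rest generalizing ach with
  | nil =>
    simp [pvLoopA, pvSS]
  | cons num rest ih =>
    rcases hinner : pvInnerA tgt num ach PySem.Set.empty with _ | newSums
    · simp only [pvLoopA, hinner, true_iff]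
      rw [pvInnerA_none_iff] at hinner
      obtain ⟨s, hs, hst⟩ := hinner
      exact ⟨s, hs, num, by
        simp only [pvSS, List.mem_append, List.mem_map]
        exact Or.inr ⟨0, pvSS_zero_mem rest, by ring⟩, hst⟩
    · simp only [pvLoopA, hinner, ih]
      constructor
      · rintro ⟨b, hb, s, hs, rfl⟩
        rw [PySem.Set.mem_update, pvInnerA_some_mem _ _ _ _ _ hinner] at hb
        rcases hb with hb | (h0 | ⟨a, ha, rfl⟩)
        · exact ⟨b, hb, s, by simp [pvSS]; exact Or.inl hs, rfl⟩
        · simp [PySem.Set.empty] at h0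
        · exact ⟨a, ha, num + s, by
            simp only [pvSS, List.mem_append, List.mem_map]
            exact Or.inr ⟨s, hs, by ring⟩, by ring⟩
      · rintro ⟨b, hb, s, hs, rfl⟩
        simp only [pvSS, List.mem_append, List.mem_map] at hs
        rcases hs with hs | ⟨s', hs', rfl⟩
        · refine ⟨b, ?_, s, hs, rfl⟩
          rw [PySem.Set.mem_update]
          exact Or.inl hb
        · refine ⟨b + num, ?_, s', hs', by ring⟩
          rw [PySem.Set.mem_update, pvInnerA_some_mem _ _ _ _ _ hinner]
          exact Or.inr (Or.inr ⟨b, hb, rfl⟩)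

lemma pvA_iff (nums : List Int) :
    can_partition_TLE nums = true ↔ PySem.Int.floordiv nums.sum 2 ∈ pvSS nums := by
  unfold can_partition_TLE
  simp only []
  rw [pvLoopA_iff]
  constructor
  · rintro ⟨b, hb, s, hs, hbs⟩
    simp [PySem.Set.empty] at hb
    rw [← hbs, hb, zero_add]
    exact hs
  · intro h
    exact ⟨0, by simp [PySem.Set.empty], _, h, by ring⟩

-- ---- B-side: pvSums computes exactly the subset sums ----

lemma pvSS_append (l1 l2 : List Int) (s : Int) :
    s ∈ pvSS (l1 ++ l2) ↔ ∃ x ∈ pvSS l1, ∃ y ∈ pvSS l2, s = x + y := by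
  induction l1 generalizing s with
  | nil =>
    simp only [List.nil_append, pvSS, List.mem_singleton]
    constructor
    · intro h; exact ⟨0, rfl, s, h, by ring⟩
    · rintro ⟨x, rfl, y, hy, rfl⟩; simpa using hy
  | cons a l1 ih =>
    simp only [List.cons_append, pvSS, List.mem_append, List.mem_map, ih]
    constructor
    · rintro (⟨x, hx, y, hy, rfl⟩ | ⟨t, ⟨x, hx, y, hy, rfl⟩, rfl⟩)
      · exact ⟨x, Or.inl hx, y, hy, rfl⟩
      · exact ⟨x + a, Or.inr ⟨x, hx, rfl⟩, y, hy, by ring⟩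
    · rintro ⟨x, hx | ⟨x', hx', rfl⟩, y, hy, rfl⟩
      · exact Or.inl ⟨x, hx, y, hy, rfl⟩
      · exact Or.inr ⟨x' + y, ⟨x', hx', y, hy, rfl⟩, by ring⟩

lemma mem_pvSums (part : List Int) : ∀ s : Int, s ∈ pvSums part ↔ s ∈ pvSS part := by
  induction part using pvSums.induct with
  | case1 _ _ =>
    simp [pvSums, pvSS, PySem.Set.mem_ofList]
  | case2 x tail h _ =>
    cases tail with
    | nil => simp [pvSums, pvSS, PySem.Set.mem_ofList]
    | cons y t => simp at h
  | case3 part h mid ih2 ih1 =>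
    intro s
    rw [pvSums, dif_neg h]
    rw [PySem.Set.mem_ofList, List.mem_flatMap]
    conv_rhs => rw [← List.take_append_drop (part.length / 2) part]
    rw [pvSS_append]
    constructor
    · rintro ⟨x, hx, hy⟩
      rw [List.mem_map] at hy
      obtain ⟨y, hy, rfl⟩ := hy
      exact ⟨x, (ih1 x).mp hx, y, (ih2 y).mp hy, rfl⟩
    · rintro ⟨x, hx, y, hy, rfl⟩
      exact ⟨x, (ih1 x).mpr hx, List.mem_map.mpr ⟨y, (ih2 y).mpr hy, rfl⟩⟩

lemma pvB_iff (nums : List Int) :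
    can_partition_TLE_alt nums = true ↔ PySem.Int.floordiv nums.sum 2 ∈ pvSS nums := by
  unfold can_partition_TLE_alt
  simp only [List.any_eq_true]
  set tgt := PySem.Int.floordiv nums.sum 2
  conv_rhs => rw [← List.take_append_drop (nums.length / 2) nums]
  rw [pvSS_append]
  constructor
  · rintro ⟨x, hx, hc⟩
    rw [PySem.Set.contains_iff, mem_pvSums] at hc
    exact ⟨x, (mem_pvSums _ _).mp hx, tgt - x, hc, by ring⟩
  · rintro ⟨x, hx, y, hy, hxy⟩
    refine ⟨x, (mem_pvSums _ _).mpr hx, ?_⟩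
    rw [PySem.Set.contains_iff, mem_pvSums]
    have : tgt - x = y := by omega
    rwa [this]

-- ===== VERDICT (by name: the statement is the Claim_ definition above) =====
theorem can_partition_TLE_spec : Claim_equal_can_partition_TLE := by
  intro nums _
  unfold Spec_can_partition_TLE
  rw [Bool.eq_iff_iff, pvA_iff, pvB_iff]
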